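-- pv_equiv track=rewrite | github.com/sherlyn99/redgenes | redgenes/process_bakta_output.py | process_dbxref
-- ===== SOURCE A (Python) =====
-- def process_dbxref(dbxref_entry):
--     entry_dict = {}
--     if dbxref_entry:
--         entries = dbxref_entry.split(',')
--         for entry in entries:
--             entry_type, entry_value = entry.split(':')
--             entry_value = entry_value.strip()
--             entry_type = entry_type.strip()
--             if entry_type not in entry_dict:
--                 entry_dict[entry_type] = [entry_value]
--             else:
--                 entry_dict[entry_type].append(entry_value)
--     else:
--         entry_dict = {}
--     dbxref_edit = {}
--     for key, value in entry_dict.items():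
--         if isinstance(value, list):
--             value_str = ', '.join(value)
--             dbxref_edit[key] = value_str
--         else:
--             dbxref_edit[key] = value
--     return dbxref_edit
-- ===== SOURCE B (Python) =====
-- def process_dbxref(dbxref_entry):
--     if not dbxref_entry:
--         return {}
--     result = {}
--     for piece in dbxref_entry.split(','):
--         entry_type, entry_value = piece.split(':')
--         t, v = entry_type.strip(), entry_value.strip()
--         result[t] = result[t] + ', ' + v if t in result else v
--     return result
-- ===== Notes on version B (the rewrite author's own statement) =====
-- stated objective: simpler
-- what changed: A builds a dict of value lists and then runs a second pass join-separating each list; B makes a single pass that accumulates the joined string per type directly, with no intermediate lists and no second loop.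
import Mathlib
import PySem

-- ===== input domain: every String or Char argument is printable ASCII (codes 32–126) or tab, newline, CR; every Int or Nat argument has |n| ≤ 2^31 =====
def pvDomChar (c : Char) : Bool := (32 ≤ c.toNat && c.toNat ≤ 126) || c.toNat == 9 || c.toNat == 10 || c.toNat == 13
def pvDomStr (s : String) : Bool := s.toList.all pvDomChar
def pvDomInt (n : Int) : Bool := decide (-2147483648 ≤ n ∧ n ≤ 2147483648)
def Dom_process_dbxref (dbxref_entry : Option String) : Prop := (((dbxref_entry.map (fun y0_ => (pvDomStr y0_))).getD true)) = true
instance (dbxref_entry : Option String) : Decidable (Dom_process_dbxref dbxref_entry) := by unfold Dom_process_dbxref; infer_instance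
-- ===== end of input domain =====

-- B replaces A's dict-of-lists + second joining pass by ONE pass that accumulates the joined
-- string per type directly (objective: simpler — one loop, no intermediate lists).

-- ===== PORT A =====
-- one iteration of A's first loop (for entry in entries); the wildcard arm is where Python's
-- tuple unpacking raises ValueError (excluded by Pre_); '(split? …).getD []' is the colon
-- split, total because the separator is non-empty
def pvAStep (d : PySem.Dict String (List String)) (entry : String) :
    PySem.Dict String (List String) :=
  match (PySem.Str.split? entry ":").getD [] with
  | [entry_type0, entry_value0] =>
      let entry_value := PySem.Str.strip entry_value0
      let entry_type := PySem.Str.strip entry_type0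
      if d.contains entry_type = false then d.insert entry_type [entry_value]
      else d.insert entry_type (d.getD entry_type [] ++ [entry_value])  -- in-place list append
  | _ => d

def process_dbxref (dbxref_entry : Option String) : List (String × String) :=
  let entry_dict : PySem.Dict String (List String) :=
    match dbxref_entry with
    | some s =>
        if s ≠ "" then ((PySem.Str.split? s ",").getD []).foldl pvAStep PySem.Dict.empty
        else PySem.Dict.empty
    | none => PySem.Dict.empty
  -- second loop: every stored value is a list here, so only the isinstance-true branch is live
  (entry_dict.items.foldl
    (fun (e : PySem.Dict String String) kv => e.insert kv.1 (PySem.Str.join ", " kv.2))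
    PySem.Dict.empty).items

-- ===== PORT B =====
-- one iteration of B's single loop; the wildcard arm is Python's ValueError (excluded by Pre_)
def pvBStep (d : PySem.Dict String String) (piece : String) : PySem.Dict String String :=
  match (PySem.Str.split? piece ":").getD [] with
  | [t0, v0] =>
      let t := PySem.Str.strip t0
      let v := PySem.Str.strip v0
      if d.contains t then d.insert t (d.getD t "" ++ ", " ++ v) else d.insert t v
  | _ => d

def process_dbxref_alt (dbxref_entry : Option String) : List (String × String) :=
  match dbxref_entry with
  | none => []
  | some s =>
      if s = "" then []
      else (((PySem.Str.split? s ",").getD []).foldl pvBStep PySem.Dict.empty).items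

-- ===== PRECONDITION & SPEC =====
-- Pre_ excludes exactly the inputs on which A (and likewise B) raises ValueError: a non-empty
-- string with some comma-separated piece that does not split at a colon into exactly two parts.
def Pre_process_dbxref (dbxref_entry : Option String) : Prop :=
  dbxref_entry.getD "" = "" ∨
    ∀ piece ∈ (PySem.Str.split? (dbxref_entry.getD "") ",").getD [],
      ((PySem.Str.split? piece ":").getD []).length = 2
instance (dbxref_entry : Option String) : Decidable (Pre_process_dbxref dbxref_entry) := by
  unfold Pre_process_dbxref; infer_instance

def pvWitness_process_dbxref : Option String := some "GO:0001, SO : 12,GO: x y"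

def Spec_process_dbxref (dbxref_entry : Option String) (out : List (String × String)) : Prop := out = process_dbxref_alt dbxref_entry
instance (dbxref_entry : Option String) (out : List (String × String)) : Decidable (Spec_process_dbxref dbxref_entry out) := by unfold Spec_process_dbxref; infer_instance

-- ===== CLAIM (what is proved, stated in full; the proofs are below) =====
def Claim_equal_process_dbxref : Prop := ∀ (dbxref_entry : Option String), Dom_process_dbxref dbxref_entry → Pre_process_dbxref dbxref_entry → Spec_process_dbxref dbxref_entry (process_dbxref dbxref_entry)

-- ===== LEMMAS AND PROOFS =====

-- the relation between A's per-type value lists and B's per-type accumulated strings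
def pvJoinPair (p : String × List String) : String × String :=
  (p.1, PySem.Str.join ", " p.2)

theorem pv_chars_join_append (sep y : List Char) (xs : List (List Char)) (h : xs ≠ []) :
    PySem.Chars.join sep (xs ++ [y]) = PySem.Chars.join sep xs ++ sep ++ y := by
  induction xs with
  | nil => simp at h
  | cons a t ih =>
    cases t with
    | nil => simp [PySem.Chars.join_cons_cons, PySem.Chars.join_singleton]
    | cons b t2 =>
      rw [List.cons_append, PySem.Chars.join_cons_cons, List.cons_append,
        PySem.Chars.join_cons_cons] at *
      rw [ih (by simp)]
      simp

theorem pv_str_join_append (v : String) (xs : List String) (h : xs ≠ []) :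
    PySem.Str.join ", " (xs ++ [v]) = PySem.Str.join ", " xs ++ ", " ++ v := by
  apply String.toList_inj.mp
  simp only [PySem.Str.join, String.toList_ofList, String.toList_append, List.map_append,
    List.map_cons, List.map_nil]
  exact pv_chars_join_append _ _ _ (by simpa using h)

theorem pv_join_singleton (v : String) : PySem.Str.join ", " [v] = v := by
  simp [PySem.Str.join]

theorem pv_keys_eq (dA : PySem.Dict String (List String)) (dB : PySem.Dict String String)
    (hinv : dB.items = dA.items.map pvJoinPair) : dB.keys = dA.keys := by
  simp only [PySem.Dict.keys, hinv, List.map_map]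
  rfl

theorem pv_step_inv (piece : String) (dA : PySem.Dict String (List String))
    (dB : PySem.Dict String String) (hnd : dA.keys.Nodup)
    (hne : ∀ p ∈ dA.items, p.2 ≠ [])
    (hinv : dB.items = dA.items.map pvJoinPair) :
    (pvBStep dB piece).items = (pvAStep dA piece).items.map pvJoinPair ∧
      (pvAStep dA piece).keys.Nodup ∧ ∀ p ∈ (pvAStep dA piece).items, p.2 ≠ [] := by
  have hkeys := pv_keys_eq dA dB hinv
  have hndB : dB.keys.Nodup := hkeys ▸ hnd
  unfold pvAStep pvBStep
  cases hsp : (PySem.Str.split? piece ":").getD [] with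
  | nil => exact ⟨hinv, hnd, hne⟩
  | cons a rest =>
    cases rest with
    | nil => exact ⟨hinv, hnd, hne⟩
    | cons b rest2 =>
      cases rest2 with
      | cons c r3 => exact ⟨hinv, hnd, hne⟩
      | nil =>
        simp only
        have hcont : dB.contains (PySem.Str.strip a) = dA.contains (PySem.Str.strip a) := by
          rw [PySem.Dict.contains_eq_decide_mem_keys, PySem.Dict.contains_eq_decide_mem_keys,
            hkeys]
        by_cases hc : dA.contains (PySem.Str.strip a) = true
        · -- key already present: both overwrite in place
          obtain ⟨p0, hp0mem, hp0⟩ : ∃ p ∈ dA.items, p.1 = PySem.Str.strip a := by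
            have : PySem.Str.strip a ∈ dA.keys := by
              have := PySem.Dict.contains_eq_decide_mem_keys dA (PySem.Str.strip a)
              rw [hc] at this
              exact of_decide_eq_true this.symm
            simpa [PySem.Dict.keys, List.mem_map] using this
          obtain ⟨k0, l0⟩ := p0
          subst hp0
          have hgA : dA.getD (PySem.Str.strip a) [] = l0 :=
            PySem.Dict.getD_of_mem_items dA hp0mem hnd []
          have hgB : dB.getD (PySem.Str.strip a) "" = PySem.Str.join ", " l0 := by
            have : (PySem.Str.strip a, PySem.Str.join ", " l0) ∈ dB.items := by
              rw [hinv]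
              exact List.mem_map.mpr ⟨_, hp0mem, rfl⟩
            exact PySem.Dict.getD_of_mem_items dB this hndB ""
          have hl0 : l0 ≠ [] := hne _ hp0mem
          rw [hcont, hc]
          simp only [Bool.true_eq_false, if_false, if_true]
          refine ⟨?_, PySem.Dict.nodup_keys_insert _ _ _ hnd, ?_⟩
          · rw [PySem.Dict.items_insert_of_contains dB _ (hcont.trans hc),
              PySem.Dict.items_insert_of_contains dA _ hc, hinv, List.map_map, List.map_map]
            apply List.map_congr_left
            intro p hp
            by_cases hpt : p.1 = PySem.Str.strip a
            · simp only [Function.comp_apply, pvJoinPair, hpt, BEq.rfl, if_true]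
              rw [hgA, hgB, pv_str_join_append _ _ hl0]
            · simp [Function.comp_apply, pvJoinPair, hpt]
          · intro p hp
            rcases (PySem.Dict.mem_items_insert _ _ _ _).mp hp with h | ⟨h, _⟩
            · subst h; simp [hgA, hl0]
            · exact hne _ h
        · -- fresh key: both append
          have hc' : dA.contains (PySem.Str.strip a) = false := by
            cases h : dA.contains (PySem.Str.strip a) with
            | true => exact absurd h hc
            | false => rfl
          rw [hcont, hc']
          simp only [Bool.false_eq_true, if_false, if_true]
          refine ⟨?_, PySem.Dict.nodup_keys_insert _ _ _ hnd, ?_⟩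
          · rw [PySem.Dict.items_insert_of_not_contains dB _ (hcont.trans hc'),
              PySem.Dict.items_insert_of_not_contains dA _ hc', hinv, List.map_append]
            simp [pvJoinPair, pv_join_singleton]
          · intro p hp
            rcases (PySem.Dict.mem_items_insert _ _ _ _).mp hp with h | ⟨h, _⟩
            · subst h; simp
            · exact hne _ h

theorem pv_fold_inv (pieces : List String) (dA : PySem.Dict String (List String))
    (dB : PySem.Dict String String) (hnd : dA.keys.Nodup)
    (hne : ∀ p ∈ dA.items, p.2 ≠ [])
    (hinv : dB.items = dA.items.map pvJoinPair) :
    (pieces.foldl pvBStep dB).items = (pieces.foldl pvAStep dA).items.map pvJoinPair ∧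
      (pieces.foldl pvAStep dA).keys.Nodup := by
  induction pieces generalizing dA dB with
  | nil => exact ⟨hinv, hnd⟩
  | cons p t ih =>
    obtain ⟨h1, h2, h3⟩ := pv_step_inv p dA dB hnd hne hinv
    exact ih _ _ h2 h3 h1

-- ===== VERDICT (by name: the statement is the Claim_ definition above) =====
theorem process_dbxref_spec : Claim_equal_process_dbxref := by
  intro o _ _
  unfold Spec_process_dbxref process_dbxref process_dbxref_alt
  cases o with
  | none => rfl
  | some s =>
    by_cases hs : s = ""
    · subst hs; rfl
    · simp only [hs, ne_eq, not_false_iff, if_true]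
      obtain ⟨h1, h2⟩ := pv_fold_inv ((PySem.Str.split? s ",").getD [])
        PySem.Dict.empty PySem.Dict.empty PySem.Dict.nodup_keys_empty
        (fun p hp => absurd hp List.not_mem_nil) rfl
      rw [PySem.Dict.items_foldl_insert_fresh
        (List.foldl pvAStep PySem.Dict.empty ((PySem.Str.split? s ",").getD [])).items
        (fun kv => kv.1) (fun kv => PySem.Str.join ", " kv.2) PySem.Dict.empty
        (fun a _ => PySem.Dict.contains_empty _) (by simpa [PySem.Dict.keys] using h2), h1]
      rfl
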